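-- pv_equiv track=rewrite | github.com/Naman7564/Glowall | tiles_catalog/catalog/templatetags/currency_tags.py | _group_indian_digits
-- ===== SOURCE A (Python) =====
-- def _group_indian_digits(number: str) -> str:
--     """Format an integer string using Indian digit grouping."""
--     if len(number) <= 3:
--         return number
--
--     last_three = number[-3:]
--     remaining = number[:-3]
--     grouped = []
--
--     while len(remaining) > 2:
--         grouped.append(remaining[-2:])
--         remaining = remaining[:-2]
--
--     if remaining:
--         grouped.append(remaining)
--
--     return ",".join(reversed(grouped)) + "," + last_three
-- ===== SOURCE B (Python) =====
-- def _group_indian_digits(number: str) -> str: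
--     """Format an integer string using Indian digit grouping."""
--     n = len(number)
--     if n <= 3:
--         return number
--     stop = n - 3
--     parts = []
--     i = stop % 2
--     if i:
--         parts.append(number[:i])
--     while i < stop:
--         parts.append(number[i:i + 2])
--         i += 2
--     parts.append(number[stop:])
--     return ",".join(parts)
-- ===== Notes on version B (the rewrite author's own statement) =====
-- stated objective: faster
-- what changed: Replaces A's while-loop that repeatedly re-slices a shrinking copy of the string's head (then reverses the collected group list) by a single left-to-right index pass that emits each group directly from precomputed boundaries.
import Mathlib
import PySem

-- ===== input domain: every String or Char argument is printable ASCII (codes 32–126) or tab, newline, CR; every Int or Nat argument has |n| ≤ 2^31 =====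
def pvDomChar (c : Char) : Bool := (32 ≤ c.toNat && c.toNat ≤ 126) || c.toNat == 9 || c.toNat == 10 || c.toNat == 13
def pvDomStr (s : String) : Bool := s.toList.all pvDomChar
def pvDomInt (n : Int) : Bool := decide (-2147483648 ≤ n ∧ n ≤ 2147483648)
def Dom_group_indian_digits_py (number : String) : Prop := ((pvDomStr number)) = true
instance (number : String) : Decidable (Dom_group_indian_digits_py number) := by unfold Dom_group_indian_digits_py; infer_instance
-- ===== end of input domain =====

-- B replaces A's repeated right-end slicing of a shrinking copy by one left-to-right
-- index pass over the original string (objective: faster, constant/asymptotic copying cost).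

-- ===== PORT A =====
-- A's while loop: append the last two characters as a group, then cut them off
def pvALoop (remaining : List Char) (grouped : List (List Char)) :
    List Char × List (List Char) :=
  if _h : remaining.length > 2 then
    pvALoop (PySem.List.slice remaining none (some (-2)))
            (grouped ++ [PySem.List.slice remaining (some (-2)) none])
  else (remaining, grouped)
termination_by remaining.length
decreasing_by
  rw [PySem.List.slice_to_neg_ofNat remaining 2 (by omega)]
  simp; omega

def group_indian_digits_py (number : String) : String :=
  let l := number.toList
  if l.length ≤ 3 then number
  else
    let last_three := PySem.List.slice l (some (-3)) none
    let remaining := PySem.List.slice l none (some (-3))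
    let p := pvALoop remaining []
    let grouped := if p.1 ≠ [] then p.2 ++ [p.1] else p.2
    String.ofList (PySem.Chars.join [','] grouped.reverse ++ [','] ++ last_three)

-- ===== PORT B =====
-- B's while loop: append the two-character group starting at index i, step i by 2
def pvBLoop (l : List Char) (stop i : Nat) (parts : List (List Char)) :
    List (List Char) :=
  if i < stop then
    pvBLoop l stop (i + 2)
      (parts ++ [PySem.List.slice l (some (i : Int)) (some ((i : Int) + 2))])
  else parts
termination_by stop - i

def group_indian_digits_py_alt (number : String) : String :=
  let l := number.toList
  let n := l.length
  if n ≤ 3 then number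
  else
    let stop := n - 3
    let i := stop % 2
    let parts : List (List Char) :=
      if i ≠ 0 then [PySem.List.slice l none (some (i : Int))] else []
    let parts := pvBLoop l stop i parts
    let parts := parts ++ [PySem.List.slice l (some (stop : Int)) none]
    String.ofList (PySem.Chars.join [','] parts)

-- ===== PRECONDITION & SPEC =====
def Spec_group_indian_digits_py (number : String) (out : String) : Prop := out = group_indian_digits_py_alt number
instance (number : String) (out : String) : Decidable (Spec_group_indian_digits_py number out) := by unfold Spec_group_indian_digits_py; infer_instance

-- ===== CLAIM (what is proved, stated in full; the proofs are below) =====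
def Claim_equal_group_indian_digits_py : Prop := ∀ (number : String), Dom_group_indian_digits_py number → Spec_group_indian_digits_py number (group_indian_digits_py number)

-- ===== LEMMAS AND PROOFS =====

-- canonical grouping of the head part: an odd-making first chunk, then pairs, left to right
def pvChunks (l : List Char) : List (List Char) :=
  if h : l = [] then []
  else l.take (2 - l.length % 2) :: pvChunks (l.drop (2 - l.length % 2))
termination_by l.length
decreasing_by
  have h0 : 0 < l.length := List.length_pos_iff.mpr h
  simp; omega

lemma pvChunks_nil : pvChunks [] = [] := by rw [pvChunks]; simp

lemma pvChunks_small (l : List Char) (h1 : l ≠ []) (h2 : l.length ≤ 2) :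
    pvChunks l = [l] := by
  have hlen : l.length = 1 ∨ l.length = 2 := by
    have : l.length ≠ 0 := by simpa using h1
    omega
  have hk : 2 - l.length % 2 = l.length := by omega
  rw [pvChunks]
  simp [h1, hk, List.take_length, pvChunks_nil]

lemma pvChunks_ne_nil (l : List Char) (h : l ≠ []) : pvChunks l ≠ [] := by
  rw [pvChunks]; simp [h]

-- chunking commutes with peeling the last pair off
lemma pvChunks_snoc : ∀ (n : Nat) (l : List Char), l.length = n → 2 < l.length →
    pvChunks l = pvChunks (l.take (l.length - 2)) ++ [l.drop (l.length - 2)] := by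
  intro n
  induction n using Nat.strong_induction_on with
  | _ n ih =>
    intro l hn hl
    have hne : l ≠ [] := by intro h; simp [h] at hl
    have hfront_ne : l.take (l.length - 2) ≠ [] := by
      intro h; have := congrArg List.length h; simp at this; omega
    rw [pvChunks, dif_neg hne]
    by_cases hsmall : l.length ≤ 4
    · -- l.length ∈ {3,4}: the first chunk is take (len-2), the tail the last pair
      have hkeq : 2 - l.length % 2 = l.length - 2 := by omega
      have htne : l.drop (2 - l.length % 2) ≠ [] := by
        intro h; have := congrArg List.length h; simp at this; omega
      rw [pvChunks_small _ htne (by simp <;> omega), hkeq,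
          pvChunks_small _ hfront_ne (by simp <;> omega)]
      simp
    · -- l.length ≥ 5
      set k := 2 - l.length % 2 with hk
      have hk12 : k = 1 ∨ k = 2 := by omega
      have hdlen : (l.drop k).length = l.length - k := by simp
      have hrec := ih (l.drop k).length (by simp <;> omega) (l.drop k) rfl (by omega)
      rw [hdlen] at hrec
      rw [hrec]
      have h1 : (l.drop k).drop (l.length - k - 2) = l.drop (l.length - 2) := by
        rw [List.drop_drop]; congr 1; omega
      have h2 : (l.drop k).take (l.length - k - 2) = (l.take (l.length - 2)).drop k := by
        rw [List.drop_take]; congr 1; omega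
      rw [h1, h2]
      have hfrontlen : (l.take (l.length - 2)).length = l.length - 2 := by simp <;> omega
      have hkfront : 2 - (l.take (l.length - 2)).length % 2 = k := by
        rw [hfrontlen]; omega
      conv_rhs => rw [pvChunks, dif_neg hfront_ne]
      rw [hkfront, List.take_take]
      have hmin : min k (l.length - 2) = k := by omega
      rw [hmin]
      simp

-- accumulator form of A's loop
lemma pvALoop_acc : ∀ (n : Nat) (rem : List Char), rem.length = n → ∀ g,
    pvALoop rem g = ((pvALoop rem []).1, g ++ (pvALoop rem []).2) := by
  intro n
  induction n using Nat.strong_induction_on with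
  | _ n ih =>
    intro rem hn g
    by_cases h : rem.length > 2
    · rw [pvALoop, dif_pos h]
      conv_rhs => rw [pvALoop, dif_pos h]
      have hlen : (PySem.List.slice rem none (some (-2))).length = rem.length - 2 := by
        rw [PySem.List.slice_to_neg_ofNat rem 2 (by omega)]; simp
      simp only [List.nil_append]
      rw [ih (rem.length - 2) (by omega) _ hlen
            (g ++ [PySem.List.slice rem (some (-2)) none]),
          ih (rem.length - 2) (by omega) _ hlen
            [PySem.List.slice rem (some (-2)) none]]
      simp
    · rw [pvALoop, dif_neg h]
      conv_rhs => rw [pvALoop, dif_neg h]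
      simp

lemma pvALoop_fst_ne_nil : ∀ (n : Nat) (rem : List Char), rem.length = n → rem ≠ [] →
    ∀ g, (pvALoop rem g).1 ≠ [] := by
  intro n
  induction n using Nat.strong_induction_on with
  | _ n ih =>
    intro rem hn hne g
    by_cases h : rem.length > 2
    · rw [pvALoop, dif_pos h]
      have hlen : (PySem.List.slice rem none (some (-2))).length = rem.length - 2 := by
        rw [PySem.List.slice_to_neg_ofNat rem 2 (by omega)]; simp
      apply ih (rem.length - 2) (by omega) _ hlen
      intro hc; rw [hc] at hlen; simp at hlen; omega
    · rw [pvALoop, dif_neg h]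
      exact hne

-- A's final grouped list, reversed, is the canonical left-to-right chunking
lemma pvAParts_eq_chunks : ∀ (n : Nat) (rem : List Char), rem.length = n → rem ≠ [] →
    ((pvALoop rem []).2 ++ [(pvALoop rem []).1]).reverse = pvChunks rem := by
  intro n
  induction n using Nat.strong_induction_on with
  | _ n ih =>
    intro rem hn hne
    by_cases h : rem.length > 2
    · conv_lhs => rw [pvALoop]
      simp only [h, dif_pos, List.nil_append]
      set rem' := PySem.List.slice rem none (some (-2)) with hrem'
      set s := PySem.List.slice rem (some (-2)) none with hs
      have hrem'v : rem' = rem.take (rem.length - 2) :=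
        PySem.List.slice_to_neg_ofNat rem 2 (by omega)
      have hsv : s = rem.drop (rem.length - 2) :=
        PySem.List.slice_from_neg_ofNat rem 2 (by omega)
      have hlen' : rem'.length = rem.length - 2 := by rw [hrem'v, List.length_take]; omega
      have hne' : rem' ≠ [] := by
        intro hc; rw [hc] at hlen'; simp at hlen'; omega
      rw [pvALoop_acc rem'.length rem' rfl [s]]
      have := ih rem'.length (by omega) rem' rfl hne'
      simp only [List.reverse_append, List.reverse_cons, List.reverse_nil] at *
      simp only [List.cons_append, List.nil_append] at *
      rw [pvChunks_snoc rem.length rem rfl h, ← hrem'v, ← hsv, ← this]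
      simp
    · rw [pvALoop]
      simp only [h, dif_neg, not_false_iff]
      rw [pvChunks_small rem hne (by omega)]
      simp
  
-- B's loop produces the chunking of the even-length segment it scans
lemma pvBLoop_eq_chunks : ∀ (d : Nat) (l : List Char) (stop i : Nat) (parts : List (List Char)),
    stop - i = d → i ≤ stop → (stop - i) % 2 = 0 → stop ≤ l.length →
    pvBLoop l stop i parts = parts ++ pvChunks ((l.take stop).drop i) := by
  intro d
  induction d using Nat.strong_induction_on with
  | _ d ih =>
    intro l stop i parts hd hle hev hstop
    by_cases h : i < stop
    · have h2 : i + 2 ≤ stop := by omega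
      rw [pvBLoop]; simp only [h, if_pos]
      rw [ih (stop - (i + 2)) (by omega) l stop (i + 2) _ rfl (by omega) (by omega) hstop]
      have hseg : PySem.List.slice l (some (i : Int)) (some ((i : Int) + 2)) = (l.drop i).take 2 := by
        have : ((i : Int) + 2) = ((i + 2 : Nat) : Int) := by push_cast; ring
        rw [this, PySem.List.slice_natCast]
        congr 1; omega
      set t := (l.take stop).drop i with ht
      have htlen : t.length = stop - i := by rw [ht]; simp; omega
      have htne : t ≠ [] := by intro hc; rw [hc] at htlen; simp at htlen; omega
      have hkt : 2 - t.length % 2 = 2 := by rw [htlen]; omega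
      conv_rhs => rw [pvChunks]
      simp only [htne, hkt]
      have h1 : t.take 2 = (l.drop i).take 2 := by
        rw [ht, List.drop_take]
        rw [List.take_take]
        congr 1; omega
      have h2' : t.drop 2 = (l.take stop).drop (i + 2) := by
        rw [ht, List.drop_drop]
      rw [hseg, h1, h2']
      simp
    · have hi : i = stop := by omega
      rw [pvBLoop]; simp only [h, if_neg, not_false_iff]
      have : (l.take stop).drop i = [] := by
        apply List.drop_eq_nil_of_le; simp; omega
      rw [this, pvChunks_nil, List.append_nil]

-- ",".join(xs + [y]) = ",".join(xs) + "," + y for nonempty xs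
lemma pvJoin_snoc (sep y : List Char) :
    ∀ xs : List (List Char), xs ≠ [] →
    PySem.Chars.join sep (xs ++ [y]) = PySem.Chars.join sep xs ++ sep ++ y := by
  intro xs
  induction xs with
  | nil => intro h; exact absurd rfl h
  | cons x t iht =>
    intro _
    cases t with
    | nil =>
      rw [List.cons_append, List.nil_append, PySem.Chars.join_cons_cons,
          PySem.Chars.join_singleton, PySem.Chars.join_singleton]
    | cons b t' =>
      rw [List.cons_append, PySem.Chars.join_cons_cons]
      rw [List.cons_append] at iht ⊢
      rw [PySem.Chars.join_cons_cons, iht (by simp)]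
      simp [List.append_assoc]

-- ===== VERDICT (by name: the statement is the Claim_ definition above) =====
theorem group_indian_digits_py_spec : Claim_equal_group_indian_digits_py := by
  intro number _
  unfold Spec_group_indian_digits_py group_indian_digits_py group_indian_digits_py_alt
  set l := number.toList with hl
  by_cases h : l.length ≤ 3
  · simp [h]
  · simp only [h, if_neg, not_false_iff]
    have h3 : 3 < l.length := by omega
    set stop := l.length - 3 with hstop
    have hstop1 : 1 ≤ stop := by omega
    have hrem : PySem.List.slice l none (some (-3)) = l.take stop :=
      PySem.List.slice_to_neg_ofNat l 3 (by omega)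
    have hlast : PySem.List.slice l (some (-3)) none = l.drop stop :=
      PySem.List.slice_from_neg_ofNat l 3 (by omega)
    have hlastB : PySem.List.slice l (some ((stop : Nat) : Int)) none = l.drop stop :=
      PySem.List.slice_from_natCast l stop
    set rem := l.take stop with hremdef
    have hremlen : rem.length = stop := by rw [hremdef]; simp; omega
    have hremne : rem ≠ [] := by intro hc; rw [hc] at hremlen; simp at hremlen; omega
    -- A side
    have hAfst := pvALoop_fst_ne_nil rem.length rem rfl hremne ([] : List (List Char))
    have hA := pvAParts_eq_chunks rem.length rem rfl hremne
    -- B side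
    set i0 := stop % 2 with hi0
    have hBloop := pvBLoop_eq_chunks (stop - i0) l stop i0
      (if i0 ≠ 0 then [PySem.List.slice l none (some (i0 : Int))] else [])
      rfl (by omega) (by omega) (by omega)
    have hBparts : (if i0 ≠ 0 then [PySem.List.slice l none (some (i0 : Int))] else [])
        ++ pvChunks ((l.take stop).drop i0) = pvChunks rem := by
      by_cases hodd : i0 = 0
      · simp [hodd, ← hremdef]
      · have hi1 : i0 = 1 := by omega
        simp only [hodd, if_pos, ne_eq, not_false_iff]
        have hsl : PySem.List.slice l none (some (i0 : Int)) = l.take i0 :=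
          PySem.List.slice_to_natCast l i0
        have hk : 2 - rem.length % 2 = 1 := by rw [hremlen]; omega
        conv_rhs => rw [pvChunks]
        simp only [hremne, hk]
        have h1 : rem.take 1 = l.take i0 := by
          rw [hremdef, List.take_take, hi1]
          congr 1; omega
        have h2 : rem.drop 1 = (l.take stop).drop i0 := by rw [hremdef, hi1]
        rw [hsl, h1, h2]
        simp
    rw [hrem, hlast, hlastB]
    rw [hBloop, hBparts]
    rw [pvJoin_snoc [','] (l.drop stop) (pvChunks rem) (pvChunks_ne_nil rem hremne)]
    rw [if_pos hAfst, hA]
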